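-- pv_equiv track=rewrite | github.com/harrisjulie/accommodation-finder | parse_disability_document.py | parse_items_and_accommodations
-- ===== SOURCE A (Python) =====
-- def parse_items_and_accommodations(text):
--     """Parse limitation/barrier items and their accommodations."""
--     items = {}
--
--     # Split into individual items (they start at the beginning of a line, not indented)
--     lines = text.strip().split('\n')
--     current_item = None
--     current_accommodations = []
--
--     for line in lines:
--         # Check if this is a new item (not indented with *, not empty)
--         if line and not line.startswith(' ') and not line.startswith('*') and not line.startswith('\t'):
--             # Save previous item if exists
--             if current_item:
--                 items[current_item] = current_accommodations
--
--             # Start new item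
--             current_item = line.strip()
--             current_accommodations = []
--
--         # If line starts with * and we have a current item, it's an accommodation
--         elif line.strip().startswith('*') and current_item:
--             accommodation = line.strip().lstrip('*').strip()
--             if accommodation:
--                 current_accommodations.append(accommodation)
--
--     # Save last item
--     if current_item:
--         items[current_item] = current_accommodations
--
--     return items
-- ===== SOURCE B (Python) =====
-- def _is_header(line):
--     return bool(line) and not line.startswith((' ', '*', '\t'))
--
--
-- def _segment(lines):
--     """Split lines into blocks, each starting at a header line; lines before
--     the first header are dropped."""
--     blocks = []
--     i = 0
--     n = len(lines)
--     while i < n and not _is_header(lines[i]):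
--         i += 1
--     while i < n:
--         j = i + 1
--         while j < n and not _is_header(lines[j]):
--             j += 1
--         blocks.append(lines[i:j])
--         i = j
--     return blocks
--
--
-- def parse_items_and_accommodations(text):
--     """Parse limitation/barrier items and their accommodations."""
--     items = {}
--     for block in _segment(text.strip().split('\n')):
--         key = block[0].strip()
--         accommodations = []
--         for s in block[1:]:
--             t = s.strip()
--             if t.startswith('*'):
--                 a = t.lstrip('*').strip()
--                 if a:
--                     accommodations.append(a)
--         if key:
--             items[key] = accommodations
--     return items
-- ===== Notes on version B (the rewrite author's own statement) =====
-- stated objective: alternative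
-- what changed: Replaces A's single pass with a running items-dict/current-item/current-accommodations accumulator by a two-pass segment-then-process decomposition: first segment the lines into blocks starting at each header line (dropping pre-header lines), then turn each block independently into a key and its filtered accommodation list and assemble the dict.
import Mathlib
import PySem

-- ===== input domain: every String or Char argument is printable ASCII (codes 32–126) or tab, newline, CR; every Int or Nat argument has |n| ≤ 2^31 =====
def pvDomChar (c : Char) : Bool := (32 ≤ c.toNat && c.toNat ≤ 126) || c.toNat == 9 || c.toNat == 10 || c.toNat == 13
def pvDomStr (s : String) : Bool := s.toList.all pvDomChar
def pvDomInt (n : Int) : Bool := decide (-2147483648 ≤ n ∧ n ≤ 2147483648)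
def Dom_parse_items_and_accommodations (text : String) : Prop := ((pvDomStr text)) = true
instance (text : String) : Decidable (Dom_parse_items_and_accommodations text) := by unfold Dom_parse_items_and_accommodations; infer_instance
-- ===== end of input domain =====

-- B replaces A's running-accumulator loop by a two-pass segment-then-process decomposition (objective: alternative structure, same cost).

-- shared primitive ports (both Pythons call these built-ins)
-- exact port of s.split('\n'): sep is the non-empty literal "\n", so split? is always `some`
def pySplitNL (s : String) : List String := (PySem.Str.split? s "\n").getD []
-- exact port of s.lstrip('*'): drops the leading run of '*' characters
def pyLstripStar (s : String) : String := String.ofList (s.toList.dropWhile (fun c => c == '*'))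
-- Python truthiness of `current_item` (a str or None): falsy iff None or ""
def pyTruthy (cur : Option String) : Bool :=
  match cur with
  | none => false
  | some s => s != ""

-- ===== PORT A =====
-- A's final "save last item" step (`if current_item: items[current_item] = current_accommodations`)
def finA (st : PySem.Dict String (List String) × Option String × List String) :
    PySem.Dict String (List String) :=
  match st.2.1 with
  | some k => if k != "" then st.1.insert k st.2.2 else st.1
  | none => st.1

-- A's inline test `line and not line.startswith(' ') and not line.startswith('*') and not line.startswith('\t')`
def aNewItem (line : String) : Bool :=
  line != "" && !(PySem.Str.startswith line " ") && !(PySem.Str.startswith line "*")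
    && !(PySem.Str.startswith line "\t")

def aStep (st : PySem.Dict String (List String) × Option String × List String) (line : String) :
    PySem.Dict String (List String) × Option String × List String :=
  let (items, cur, accs) := st
  if aNewItem line then
    let items :=
      match cur with
      | some k => if k != "" then items.insert k accs else items
      | none => items
    (items, some (PySem.Str.strip line), [])
  else if PySem.Str.startswith (PySem.Str.strip line) "*" && pyTruthy cur then
    let accommodation := PySem.Str.strip (pyLstripStar (PySem.Str.strip line))
    if accommodation != "" then (items, cur, accs ++ [accommodation]) else (items, cur, accs)
  else (items, cur, accs)

def parse_items_and_accommodations (text : String) : List (String × List String) :=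
  let lines := pySplitNL (PySem.Str.strip text)
  let st := lines.foldl aStep (PySem.Dict.empty, none, [])
  (finA st).items

-- ===== PORT B =====
def bIsHeader (line : String) : Bool :=
  line != "" && !(PySem.Str.startswith line " ") && !(PySem.Str.startswith line "*")
    && !(PySem.Str.startswith line "\t")

-- _segment: blocks start at header lines; lines before the first header are dropped
def bSegment (lines : List String) : List (List String) :=
  match lines with
  | [] => []
  | l :: ls =>
    if bIsHeader l then
      (l :: ls.takeWhile (fun x => !bIsHeader x)) :: bSegment (ls.dropWhile (fun x => !bIsHeader x))
    else bSegment ls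
termination_by lines.length
decreasing_by
  · have := List.length_dropWhile_le (fun x => !bIsHeader x) ls
    simp; omega
  · simp

def bAccOf (s : String) : Option String :=
  let t := PySem.Str.strip s
  if PySem.Str.startswith t "*" then
    let a := PySem.Str.strip (pyLstripStar t)
    if a != "" then some a else none
  else none

def bBlockStep (items : PySem.Dict String (List String)) (block : List String) :
    PySem.Dict String (List String) :=
  let key := PySem.Str.strip (block.headD "")
  let accommodations := block.tail.filterMap bAccOf
  if key != "" then items.insert key accommodations else items

def parse_items_and_accommodations_alt (text : String) : List (String × List String) :=
  ((bSegment (pySplitNL (PySem.Str.strip text))).foldl bBlockStep PySem.Dict.empty).items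

-- ===== PRECONDITION & SPEC =====
def Spec_parse_items_and_accommodations (text : String) (out : List (String × List String)) : Prop := out = parse_items_and_accommodations_alt text
instance (text : String) (out : List (String × List String)) : Decidable (Spec_parse_items_and_accommodations text out) := by unfold Spec_parse_items_and_accommodations; infer_instance

-- ===== CLAIM (what is proved, stated in full; the proofs are below) =====
def Claim_equal_parse_items_and_accommodations : Prop := ∀ (text : String), Dom_parse_items_and_accommodations text → Spec_parse_items_and_accommodations text (parse_items_and_accommodations text)

-- ===== LEMMAS AND PROOFS =====

theorem aNewItem_eq_bIsHeader (l : String) : aNewItem l = bIsHeader l := rfl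

theorem seg_dropWhile (ls : List String) :
    bSegment (ls.dropWhile (fun x => !bIsHeader x)) = bSegment ls := by
  induction ls with
  | nil => rfl
  | cons l ls ih =>
    by_cases h : bIsHeader l
    · simp [h]
    · rw [List.dropWhile_cons]
      simp only [h, Bool.not_false, if_true]
      rw [ih]
      conv_rhs => rw [bSegment]
      simp [h]

theorem AB_loop (lines : List String) :
    (∀ (d : PySem.Dict String (List String)) (accs : List String) (cur : Option String),
        pyTruthy cur = false →
        finA (lines.foldl aStep (d, cur, accs)) = (bSegment lines).foldl bBlockStep d)
  ∧ (∀ (d : PySem.Dict String (List String)) (accs : List String) (k : String), k ≠ "" →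
        finA (lines.foldl aStep (d, some k, accs)) =
          (bSegment (lines.dropWhile (fun x => !bIsHeader x))).foldl bBlockStep
            (d.insert k (accs ++ (lines.takeWhile (fun x => !bIsHeader x)).filterMap bAccOf))) := by
  induction lines with
  | nil =>
    constructor
    · intro d accs cur hcur
      match cur with
      | none => simp [finA, bSegment]
      | some s =>
        simp [pyTruthy] at hcur
        simp [finA, hcur, bSegment]
    · intro d accs k hk
      simp [finA, bSegment, hk]
  | cons l ls ih =>
    obtain ⟨ihM, ihL⟩ := ih
    -- after a header line, the rest of the loop produces exactly B's fold over the block list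
    have hA : ∀ (d : PySem.Dict String (List String)), bIsHeader l = true →
        finA (ls.foldl aStep (d, some (PySem.Str.strip l), [])) =
          (bSegment (l :: ls)).foldl bBlockStep d := by
      intro d hH
      rw [bSegment]
      rw [if_pos hH, List.foldl_cons]
      have hblock : bBlockStep d (l :: ls.takeWhile (fun x => !bIsHeader x)) =
          if PySem.Str.strip l != "" then
            d.insert (PySem.Str.strip l)
              ((ls.takeWhile (fun x => !bIsHeader x)).filterMap bAccOf)
          else d := by
        simp [bBlockStep]
      by_cases hs : PySem.Str.strip l = ""
      · rw [hblock]
        rw [hs]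
        simp only [bne_self_eq_false, Bool.false_eq_true, if_false]
        rw [seg_dropWhile]
        exact ihM d [] (some "") (by simp [pyTruthy])
      · rw [hblock]
        rw [if_pos (by simpa using hs)]
        have := ihL d [] (PySem.Str.strip l) hs
        simpa using this
    constructor
    · intro d accs cur hcur
      by_cases hH : bIsHeader l = true
      · have hstep : aStep (d, cur, accs) l = (d, some (PySem.Str.strip l), []) := by
          match cur with
          | none => simp [aStep, aNewItem_eq_bIsHeader, hH]
          | some s =>
            simp [pyTruthy] at hcur
            simp [aStep, aNewItem_eq_bIsHeader, hH, hcur]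
        rw [List.foldl_cons, hstep]
        exact hA d hH
      · have hbneg : bIsHeader l = false := by simpa using hH
        have hstep : aStep (d, cur, accs) l = (d, cur, accs) := by
          simp [aStep, aNewItem_eq_bIsHeader, hbneg, hcur]
        rw [List.foldl_cons, hstep, ihM d accs cur hcur]
        conv_rhs => rw [bSegment]
        simp [hbneg]
    · intro d accs k hk
      have hT : pyTruthy (some k) = true := by simp [pyTruthy, hk]
      by_cases hH : bIsHeader l = true
      · have hstep : aStep (d, some k, accs) l = (d.insert k accs, some (PySem.Str.strip l), []) := by
          simp [aStep, aNewItem_eq_bIsHeader, hH, hk]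
        rw [List.foldl_cons, hstep]
        rw [hA (d.insert k accs) hH]
        have ht : (l :: ls).takeWhile (fun x => !bIsHeader x) = [] := by
          simp [hH]
        have hd : (l :: ls).dropWhile (fun x => !bIsHeader x) = l :: ls := by
          simp [hH]
        rw [ht, hd]
        simp
      · have hbneg : bIsHeader l = false := by simpa using hH
        have ht : (l :: ls).takeWhile (fun x => !bIsHeader x) =
            l :: ls.takeWhile (fun x => !bIsHeader x) := by
          simp [hbneg]
        have hd : (l :: ls).dropWhile (fun x => !bIsHeader x) =
            ls.dropWhile (fun x => !bIsHeader x) := by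
          simp [hbneg]
        have hstep : aStep (d, some k, accs) l = (d, some k, accs ++ (bAccOf l).toList) := by
          by_cases hs : PySem.Chars.startswith (PySem.Chars.strip l.toList) ['*'] = true <;>
            by_cases ha : PySem.Str.strip (pyLstripStar (PySem.Str.strip l)) = "" <;>
              simp [aStep, bAccOf, aNewItem_eq_bIsHeader, hbneg, hT, hs, ha]
        rw [List.foldl_cons, hstep, ihL d (accs ++ (bAccOf l).toList) k hk]
        rw [ht, hd, List.filterMap_cons]
        cases hacc : bAccOf l with
        | none => simp
        | some a => simp

-- ===== VERDICT (by name: the statement is the Claim_ definition above) =====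
theorem parse_items_and_accommodations_spec : Claim_equal_parse_items_and_accommodations := by
  intro text _
  show parse_items_and_accommodations text = parse_items_and_accommodations_alt text
  have h := (AB_loop (pySplitNL (PySem.Str.strip text))).1 PySem.Dict.empty [] none rfl
  unfold parse_items_and_accommodations parse_items_and_accommodations_alt
  exact congrArg PySem.Dict.items h
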